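-- pv_equiv track=rewrite | github.com/giuseppesalvi/website-screenshot-and-code-getter | stats.py | sum_of_dict_sizes
-- ===== SOURCE A (Python) =====
-- def sum_of_dict_sizes(lst):
--     size = 0
--     for element in lst:
--         if isinstance(element, dict):
--             size += len(element)
--         else:
--             return len(lst)
--     return size
-- ===== SOURCE B (Python) =====
-- def sum_of_dict_sizes(lst):
--     if any(not isinstance(e, dict) for e in lst):
--         return len(lst)
--
--     def total(lo, hi):
--         n = hi - lo
--         if n == 0:
--             return 0
--         if n == 1:
--             return len(lst[lo])
--         mid = (lo + hi) // 2
--         return total(lo, mid) + total(mid, hi)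
--
--     return total(0, len(lst))
-- ===== Notes on version B (the rewrite author's own statement) =====
-- stated objective: alternative
-- what changed: Replaces A's linear accumulate-with-early-return loop by a guard followed by a divide-and-conquer recursion total(lo, hi) that splits the index range in halves and sums the two halves' dict sizes.
import Mathlib
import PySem

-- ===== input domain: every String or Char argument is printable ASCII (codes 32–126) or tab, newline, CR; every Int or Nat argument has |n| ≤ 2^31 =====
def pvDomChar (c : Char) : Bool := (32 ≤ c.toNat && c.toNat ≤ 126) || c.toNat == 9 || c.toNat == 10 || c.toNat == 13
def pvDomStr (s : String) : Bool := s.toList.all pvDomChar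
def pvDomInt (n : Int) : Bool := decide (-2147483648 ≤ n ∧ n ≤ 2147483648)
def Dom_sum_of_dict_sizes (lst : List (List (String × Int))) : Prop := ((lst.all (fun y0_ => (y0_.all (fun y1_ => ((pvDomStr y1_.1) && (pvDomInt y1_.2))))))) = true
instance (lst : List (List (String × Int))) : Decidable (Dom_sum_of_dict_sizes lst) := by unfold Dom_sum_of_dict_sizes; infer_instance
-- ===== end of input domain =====

-- B replaces A's linear accumulate-with-early-return loop by a divide-and-conquer recursion
-- total(lo, hi) over index ranges (same asymptotic cost, different algorithmic structure).
-- Under the typed domain every element is a dict, so both programs' non-dict branches are unreachable.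

-- ===== PORT A =====
-- the loop `for element in lst: size += len(element)` with accumulator `size`
def pvA_loop : List (List (String × Int)) → Int → Int
  | [], size => size
  | element :: rest, size => pvA_loop rest (size + (element.length : Int))

def sum_of_dict_sizes (lst : List (List (String × Int))) : Int :=
  pvA_loop lst 0

-- ===== PORT B =====
-- the inner recursion `total(lo, hi)`; `lst[lo]` is PySem.List.pyGet? (always in range when
-- lo < hi ≤ len lst, so the `.getD []` default is never taken on any reachable call)
def pvB_total (lst : List (List (String × Int))) (lo hi : Nat) : Int :=
  if hi - lo = 0 then 0
  else if hi - lo = 1 then ((((PySem.List.pyGet? lst (lo : Int)).getD []).length : Int))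
  else  -- mid = (lo + hi) // 2 : lo, hi are nonnegative, so Nat `/ 2` is exactly Python's `// 2` here
    pvB_total lst lo ((lo + hi) / 2) + pvB_total lst ((lo + hi) / 2) hi
termination_by hi - lo
decreasing_by all_goals omega

-- the `any(not isinstance(e, dict) …)` guard is vacuously false on this typed domain
def sum_of_dict_sizes_alt (lst : List (List (String × Int))) : Int :=
  pvB_total lst 0 lst.length

-- ===== PRECONDITION & SPEC =====
def Spec_sum_of_dict_sizes (lst : List (List (String × Int))) (out : Int) : Prop := out = sum_of_dict_sizes_alt lst
instance (lst : List (List (String × Int))) (out : Int) : Decidable (Spec_sum_of_dict_sizes lst out) := by unfold Spec_sum_of_dict_sizes; infer_instance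

-- ===== CLAIM (what is proved, stated in full; the proofs are below) =====
def Claim_equal_sum_of_dict_sizes : Prop := ∀ (lst : List (List (String × Int))), Dom_sum_of_dict_sizes lst → Spec_sum_of_dict_sizes lst (sum_of_dict_sizes lst)

-- ===== LEMMAS AND PROOFS =====

theorem pvA_loop_eq (lst : List (List (String × Int))) (acc : Int) :
    pvA_loop lst acc = acc + (lst.map (fun e => (e.length : Int))).sum := by
  induction lst generalizing acc with
  | nil => simp [pvA_loop]
  | cons e rest ih => simp [pvA_loop, ih]; ring

-- segment characterisation of the divide-and-conquer recursion
theorem pvB_total_eq (lst : List (List (String × Int))) :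
    ∀ n lo hi, hi - lo = n → hi ≤ lst.length →
      pvB_total lst lo hi = (((lst.drop lo).take (hi - lo)).map (fun e => (e.length : Int))).sum := by
  intro n
  induction n using Nat.strong_induction_on with
  | _ n ih =>
    intro lo hi hn hle
    subst hn
    rw [pvB_total]
    split
    · next h0 => rw [h0]; simp
    · split
      · next h0 h1 =>
        have hlo : lo < lst.length := by omega
        have hget : PySem.List.pyGet? lst (lo : Int) = some lst[lo] :=
          PySem.List.pyGet?_ofNat lst lo hlo
        rw [h1, hget]
        have htake : (lst.drop lo).take 1 = [lst[lo]] := by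
          rw [List.drop_eq_getElem_cons hlo, List.take_succ_cons, List.take_zero]
        rw [htake]
        simp
      · next h0 h1 =>
        have h2 : 2 ≤ hi - lo := by omega
        obtain ⟨m, hm⟩ : ∃ m, (lo + hi) / 2 = m := ⟨_, rfl⟩
        rw [hm]
        have hm1 : lo < m := by omega
        have hm2 : m < hi := by omega
        have e1 := ih (m - lo) (by omega) lo m rfl (by omega)
        have e2 := ih (hi - m) (by omega) m hi rfl hle
        rw [e1, e2]
        have hsplit : (lst.drop lo).take (hi - lo)
            = (lst.drop lo).take (m - lo) ++ (lst.drop m).take (hi - m) := by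
          have : hi - lo = (m - lo) + (hi - m) := by omega
          rw [this, List.take_add, List.drop_drop]
          congr 2
          have hml : lo + (m - lo) = m := by omega
          rw [hml]
        rw [hsplit]
        simp

-- ===== VERDICT (by name: the statement is the Claim_ definition above) =====
theorem sum_of_dict_sizes_spec : Claim_equal_sum_of_dict_sizes := by
  intro lst _
  unfold Spec_sum_of_dict_sizes sum_of_dict_sizes sum_of_dict_sizes_alt
  rw [pvA_loop_eq, pvB_total_eq lst lst.length 0 lst.length rfl (le_refl _)]
  simp
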